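-- pv_equiv track=rewrite | github.com/leandro1989/Grafo_introdutorio | main.py | vert_NaoAdjacentes
-- ===== SOURCE A (Python) =====
-- def vert_NaoAdjacentes(Vertices, nome_arestas):
--     conj_vertNaoAdj = []
--     for vert1 in Vertices:
--         for vert2 in Vertices:
--             if (vert1 + '-' + vert2) not in nome_arestas and (vert2 + '-' + vert1) not in nome_arestas and vert1 != vert2 \
--                     and (vert1,vert2) not in conj_vertNaoAdj and (vert2,vert1) not in conj_vertNaoAdj:
--                 conj_vertNaoAdj.append((vert1, vert2))
--     return conj_vertNaoAdj
-- ===== SOURCE B (Python) =====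
-- def vert_NaoAdjacentes(Vertices, nome_arestas):
--     edges = set(nome_arestas)
--     seen = set()
--     result = []
--     for i, a in enumerate(Vertices):
--         for b in Vertices[i + 1:]:
--             if a != b and a + '-' + b not in edges and b + '-' + a not in edges and (a, b) not in seen:
--                 result.append((a, b))
--                 seen.add((a, b))
--                 seen.add((b, a))
--     return result
-- ===== Notes on version B (the rewrite author's own statement) =====
-- stated objective: faster
-- what changed: B replaces the full V x V scan with list membership re-scans of edges and of the growing result by a triangular i<j traversal using a hash edge set and a hash seen set of emitted pairs, so every adjacency/duplicate test is O(1).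
import Mathlib
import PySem

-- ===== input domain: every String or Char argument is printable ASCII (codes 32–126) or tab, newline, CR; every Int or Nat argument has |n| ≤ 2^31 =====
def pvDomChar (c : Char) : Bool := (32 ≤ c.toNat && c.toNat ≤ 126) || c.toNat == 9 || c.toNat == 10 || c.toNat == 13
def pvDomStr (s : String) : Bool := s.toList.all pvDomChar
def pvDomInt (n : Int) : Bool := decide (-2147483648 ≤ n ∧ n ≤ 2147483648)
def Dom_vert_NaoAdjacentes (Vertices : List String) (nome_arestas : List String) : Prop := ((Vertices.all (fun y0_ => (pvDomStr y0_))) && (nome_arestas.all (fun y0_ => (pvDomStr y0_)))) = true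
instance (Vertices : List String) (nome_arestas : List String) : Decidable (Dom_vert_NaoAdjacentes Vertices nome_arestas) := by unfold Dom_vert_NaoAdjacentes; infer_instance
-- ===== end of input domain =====

-- B replaces A's full V×V scan with list re-scans of the edge list and of the growing result
-- by a triangular i<j traversal over a hash edge set and a hash 'seen' set (objective: faster).


-- ===== PORT A =====
def vert_NaoAdjacentes (Vertices : List String) (nome_arestas : List String) : List (String × String) :=
  Vertices.foldl (fun conj vert1 =>
    Vertices.foldl (fun conj vert2 =>
      if (vert1 ++ "-" ++ vert2) ∉ nome_arestas ∧ (vert2 ++ "-" ++ vert1) ∉ nome_arestas ∧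
         vert1 ≠ vert2 ∧ (vert1, vert2) ∉ conj ∧ (vert2, vert1) ∉ conj then
        conj ++ [(vert1, vert2)]
      else conj) conj) []

-- ===== PORT B =====
def vert_NaoAdjacentes_alt (Vertices : List String) (nome_arestas : List String) : List (String × String) :=
  let edges : PySem.Set String := PySem.Set.ofList nome_arestas
  (((PySem.List.enumerate Vertices).foldl
    (fun (st : List (String × String) × PySem.Set (String × String)) p =>
      (PySem.List.slice Vertices (some (p.1 + 1)) none).foldl
        (fun st b =>
          if p.2 ≠ b ∧ (p.2 ++ "-" ++ b) ∉ edges ∧ (b ++ "-" ++ p.2) ∉ edges ∧ (p.2, b) ∉ st.2 then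
            (st.1 ++ [(p.2, b)], PySem.Set.add (PySem.Set.add st.2 (p.2, b)) (b, p.2))
          else st) st)
    ([], PySem.Set.empty)).1)

-- ===== PRECONDITION & SPEC =====
def Spec_vert_NaoAdjacentes (Vertices : List String) (nome_arestas : List String) (out : List (String × String)) : Prop := out = vert_NaoAdjacentes_alt Vertices nome_arestas
instance (Vertices : List String) (nome_arestas : List String) (out : List (String × String)) : Decidable (Spec_vert_NaoAdjacentes Vertices nome_arestas out) := by unfold Spec_vert_NaoAdjacentes; infer_instance

-- ===== CLAIM (what is proved, stated in full; the proofs are below) =====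
def Claim_equal_vert_NaoAdjacentes : Prop := ∀ (Vertices : List String) (nome_arestas : List String), Dom_vert_NaoAdjacentes Vertices nome_arestas → Spec_vert_NaoAdjacentes Vertices nome_arestas (vert_NaoAdjacentes Vertices nome_arestas)

-- ===== LEMMAS AND PROOFS =====

-- A's inner-loop step for a fixed row vertex `a` (definitionally A's lambda).
def fstep (E : List String) (a : String) (acc : List (String × String)) (b : String) : List (String × String) :=
  if (a ++ "-" ++ b) ∉ E ∧ (b ++ "-" ++ a) ∉ E ∧ a ≠ b ∧ (a, b) ∉ acc ∧ (b, a) ∉ acc then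
    acc ++ [(a, b)]
  else acc

-- B's inner-loop step (definitionally B's lambda, with the edge set written as ofList E).
def gstep (E : List String) (a : String)
    (st : List (String × String) × PySem.Set (String × String)) (b : String) :
    List (String × String) × PySem.Set (String × String) :=
  if a ≠ b ∧ (a ++ "-" ++ b) ∉ PySem.Set.ofList E ∧ (b ++ "-" ++ a) ∉ PySem.Set.ofList E ∧ (a, b) ∉ st.2 then
    (st.1 ++ [(a, b)], PySem.Set.add (PySem.Set.add st.2 (a, b)) (b, a))
  else st

-- the symmetric "qualifying pair" condition both programs test
def pcond (E : List String) (a b : String) : Prop :=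
  (a ++ "-" ++ b) ∉ E ∧ (b ++ "-" ++ a) ∉ E ∧ a ≠ b

def pairIn (acc : List (String × String)) (a b : String) : Prop :=
  (a, b) ∈ acc ∨ (b, a) ∈ acc

-- common triangular recursion both programs are reduced to (A-side state)
def triA (E : List String) (acc : List (String × String)) : List String → List (String × String)
  | [] => acc
  | a :: rest => triA E (rest.foldl (fstep E a) acc) rest

-- B-side triangular recursion (carries the seen set)
def triB (E : List String) (st : List (String × String) × PySem.Set (String × String)) :
    List String → List (String × String) × PySem.Set (String × String)
  | [] => st
  | a :: rest => triB E (rest.foldl (gstep E a) st) rest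

theorem pcond_symm {E a b} (h : pcond E a b) : pcond E b a :=
  ⟨h.2.1, h.1, fun e => h.2.2 e.symm⟩

theorem fstep_cases (E a acc b) : fstep E a acc b = acc ∨ fstep E a acc b = acc ++ [(a, b)] := by
  unfold fstep; split_ifs <;> simp

theorem fstep_self (E a acc) : fstep E a acc a = acc := by
  unfold fstep
  rw [if_neg]; rintro ⟨-, -, h, -⟩; exact h rfl

theorem mem_fstep {x E a acc b} (h : x ∈ acc) : x ∈ fstep E a acc b := by
  rcases fstep_cases E a acc b with he | he <;> rw [he] <;> simp [h]

theorem mem_foldl_fstep {x E a acc} (l : List String) (h : x ∈ acc) :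
    x ∈ l.foldl (fstep E a) acc := by
  induction l generalizing acc with
  | nil => exact h
  | cons b t ih => exact ih (mem_fstep h)

theorem pairIn_foldl_fstep {E a acc x y} (l : List String) (h : pairIn acc x y) :
    pairIn (l.foldl (fstep E a) acc) x y := by
  rcases h with h | h
  · exact Or.inl (mem_foldl_fstep l h)
  · exact Or.inr (mem_foldl_fstep l h)

theorem row_noop {E a} (l : List String) (acc : List (String × String))
    (h : ∀ b ∈ l, pcond E a b → pairIn acc a b) : l.foldl (fstep E a) acc = acc := by
  induction l with
  | nil => rfl
  | cons b t ih =>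
    have hb : fstep E a acc b = acc := by
      unfold fstep
      rw [if_neg]
      rintro ⟨h1, h2, h3, h4, h5⟩
      rcases h b (by simp) ⟨h1, h2, h3⟩ with hm | hm
      · exact h4 hm
      · exact h5 hm
    simp only [List.foldl_cons, hb]
    exact ih (fun b hb' hc => h b (by simp [hb']) hc)

theorem row_covers {E a} (l : List String) (acc : List (String × String)) :
    ∀ b ∈ l, pcond E a b → pairIn (l.foldl (fstep E a) acc) a b := by
  induction l generalizing acc with
  | nil => intro b hb; simp at hb
  | cons c t ih =>
    intro b hb hc
    rcases List.mem_cons.mp hb with rfl | hb'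
    · -- the head: fstep either appends (a,b) or the pair was already in acc
      simp only [List.foldl_cons]
      apply pairIn_foldl_fstep
      unfold fstep
      split_ifs with hif
      · exact Or.inl (by simp)
      · -- condition failed; since pcond holds, a membership must hold
        rcases hc with ⟨h1, h2, h3⟩
        by_cases hm : (a, b) ∈ acc
        · exact Or.inl hm
        · by_cases hm' : (b, a) ∈ acc
          · exact Or.inr hm'
          · exact absurd ⟨h1, h2, h3, hm, hm'⟩ hif
    · simp only [List.foldl_cons]
      exact ih _ b hb' hc

-- A equals the triangular recursion triA
theorem A_eq_triA (E : List String) (V : List String) :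
    ∀ (L pre : List String) (acc : List (String × String)), V = pre ++ L →
      (∀ a ∈ L, ∀ b ∈ pre, pcond E a b → pairIn acc a b) →
      L.foldl (fun acc a => V.foldl (fstep E a) acc) acc = triA E acc L := by
  intro L
  induction L with
  | nil => intro pre acc _ _; rfl
  | cons a rest ih =>
    intro pre acc hV hinv
    have hrow : V.foldl (fstep E a) acc = rest.foldl (fstep E a) acc := by
      rw [hV, List.foldl_append]
      rw [row_noop pre acc (fun b hb hc => hinv a (by simp) b hb hc)]
      simp only [List.foldl_cons, fstep_self]
    simp only [List.foldl_cons, hrow, triA]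
    apply ih (pre ++ [a]) _ (by simpa using hV)
    intro a' ha' b hb hc
    rcases List.mem_append.mp hb with hb' | hb'
    · exact pairIn_foldl_fstep rest (hinv a' (by simp [ha']) b hb' hc)
    · have : b = a := by simpa using hb'
      subst this
      have := row_covers rest acc a' ha' (pcond_symm hc)
      rcases this with h | h
      · exact Or.inr h
      · exact Or.inl h

-- invariant tying B's seen set to its output list
def SeenInv (st : List (String × String) × PySem.Set (String × String)) : Prop :=
  ∀ x y : String, (x, y) ∈ st.2 ↔ pairIn st.1 x y

theorem gstep_step {E a st b} (hInv : SeenInv st) :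
    (gstep E a st b).1 = fstep E a st.1 b ∧ SeenInv (gstep E a st b) := by
  unfold gstep fstep
  by_cases hc : pcond E a b
  · rcases hc with ⟨h1, h2, h3⟩
    by_cases hm : (a, b) ∈ st.2
    · have hp : pairIn st.1 a b := (hInv a b).mp hm
      rw [if_neg (by rintro ⟨-, -, -, h⟩; exact h hm), if_neg ?_]
      · exact ⟨rfl, hInv⟩
      · rintro ⟨-, -, -, h4, h5⟩
        rcases hp with h | h
        · exact h4 h
        · exact h5 h
    · have hp : ¬ pairIn st.1 a b := fun h => hm ((hInv a b).mpr h)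
      rw [if_pos ⟨h3, by simpa [PySem.Set.mem_ofList] using h1,
            by simpa [PySem.Set.mem_ofList] using h2, hm⟩,
          if_pos ⟨h1, h2, h3, fun h => hp (Or.inl h), fun h => hp (Or.inr h)⟩]
      refine ⟨rfl, fun x y => ?_⟩
      simp only [PySem.Set.mem_add, hInv x y, pairIn, List.mem_append, List.mem_singleton,
        Prod.mk.injEq]
      constructor
      · rintro ((h | ⟨rfl, rfl⟩) | ⟨rfl, rfl⟩)
        · tauto
        · tauto
        · tauto
      · rintro ((h | ⟨rfl, rfl⟩) | (h | ⟨rfl, rfl⟩)) <;> tauto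
  · have h1 : ¬ (a ≠ b ∧ (a ++ "-" ++ b) ∉ PySem.Set.ofList E ∧
        (b ++ "-" ++ a) ∉ PySem.Set.ofList E ∧ (a, b) ∉ st.2) := fun h =>
      hc ⟨by simpa [PySem.Set.mem_ofList] using h.2.1,
        by simpa [PySem.Set.mem_ofList] using h.2.2.1, h.1⟩
    have h2 : ¬ ((a ++ "-" ++ b) ∉ E ∧ (b ++ "-" ++ a) ∉ E ∧ a ≠ b ∧
        (a, b) ∉ st.1 ∧ (b, a) ∉ st.1) := fun h => hc ⟨h.1, h.2.1, h.2.2.1⟩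
    rw [if_neg h1, if_neg h2]
    exact ⟨rfl, hInv⟩

theorem rowBA {E a} (l : List String) (st) (hInv : SeenInv st) :
    (l.foldl (gstep E a) st).1 = l.foldl (fstep E a) st.1 ∧ SeenInv (l.foldl (gstep E a) st) := by
  induction l generalizing st with
  | nil => exact ⟨rfl, hInv⟩
  | cons b t ih =>
    obtain ⟨h1, h2⟩ := gstep_step (E := E) (a := a) (b := b) hInv
    simp only [List.foldl_cons]
    obtain ⟨h3, h4⟩ := ih _ h2
    exact ⟨by rw [h3, h1], h4⟩

theorem triBA (E : List String) : ∀ (l : List String) (st), SeenInv st →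
    (triB E st l).1 = triA E st.1 l := by
  intro l
  induction l with
  | nil => intro st _; rfl
  | cons a rest ih =>
    intro st hInv
    obtain ⟨h1, h2⟩ := rowBA (E := E) (a := a) rest st hInv
    simp only [triB, triA, ih _ h2, h1]

-- B's enumerate/slice double loop is the triangular recursion triB
theorem B_eq_triB (E : List String) (V : List String) :
    ∀ (tail : List String) (k : Nat) (st), tail = V.drop k →
      (PySem.List.enumerate tail (k : Int)).foldl
        (fun st p => (PySem.List.slice V (some (p.1 + 1)) none).foldl (gstep E p.2) st) st
      = triB E st tail := by
  intro tail
  induction tail with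
  | nil => intro k st _; rfl
  | cons a rest ih =>
    intro k st hk
    rw [PySem.List.enumerate_cons]
    simp only [List.foldl_cons]
    have hdrop : V.drop (k + 1) = rest := by
      have h1 := congrArg List.tail hk
      simpa [List.tail_drop] using h1.symm
    have hcast : ((k : Int) + 1) = ((k + 1 : Nat) : Int) := by push_cast; ring
    have hslice : PySem.List.slice V (some ((k : Int) + 1)) none = rest := by
      rw [hcast, PySem.List.slice_from_natCast, hdrop]
    simp only [hslice, triB]
    rw [hcast]
    exact ih (k + 1) (rest.foldl (gstep E a) st) hdrop.symm

theorem Inv_init : SeenInv ([], PySem.Set.empty) := by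
  intro x y
  simp [PySem.Set.empty, pairIn]

-- ===== VERDICT (by name: the statement is the Claim_ definition above) =====
theorem vert_NaoAdjacentes_spec : Claim_equal_vert_NaoAdjacentes := by
  intro V E _
  show vert_NaoAdjacentes V E = vert_NaoAdjacentes_alt V E
  have hA : vert_NaoAdjacentes V E = V.foldl (fun acc a => V.foldl (fstep E a) acc) [] := rfl
  have hB : vert_NaoAdjacentes_alt V E =
      ((PySem.List.enumerate V (0 : Int)).foldl
        (fun st p => (PySem.List.slice V (some (p.1 + 1)) none).foldl (gstep E p.2) st)
        ([], PySem.Set.empty)).1 := rfl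
  rw [hA, hB]
  rw [show ((0 : Int)) = ((0 : Nat) : Int) from rfl]
  rw [B_eq_triB E V V 0 ([], PySem.Set.empty) rfl]
  rw [triBA E V ([], PySem.Set.empty) Inv_init]
  exact A_eq_triA E V V [] [] rfl (by simp)
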